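-- pv_equiv track=rewrite | github.com/chuoer47/AlgorithmLearning | 刷题记录/其他平台/比赛/蓝桥杯25年省赛/E.py | solution
-- ===== SOURCE A (Python) =====
-- def solution(n, m, bottle):
--     # 最小值最大化
--     group = [[] for _ in range(m)]
--     for i in range(n):
--         group[i % m].append(bottle[i])
--
--     def check(mid):
--         for i in range(m):
--             now = group[i]
--             remind = 0
--             for j in range(len(now)):
--                 if now[j] >= mid:
--                     remind += now[j] - mid
--                 else:
--                     # now[j] < mid
--                     remind -= mid - now[j]
--                     if remind < 0:
--                         return False
--         return True
--
--     l, r = min(bottle), max(bottle)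
--     ans = l
--     while l <= r:
--         mid = (l + r) >> 1
--         if check(mid):
--             ans = max(ans, mid)
--             l = mid + 1
--         else:
--             r = mid - 1
--     return ans
-- ===== SOURCE B (Python) =====
-- def solution(n, m, bottle):
--     # Single linear pass: the answer is the minimum over all groups and all
--     # prefixes of floor(prefix_sum / prefix_len), capped by max(bottle).
--     ans = max(bottle)
--     for g in range(m):
--         s = 0
--         c = 0
--         for i in range(g, n, m):
--             s += bottle[i]
--             c += 1
--             ans = min(ans, s // c)
--     return ans
-- ===== Notes on version B (the rewrite author's own statement) =====
-- stated objective: faster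
-- what changed: Replaces the binary search over the value range (each probe rescanning every group) by a single linear pass that takes the minimum of floor(prefix_sum/prefix_len) over all prefixes of the residue groups, capped by max(bottle).
import Mathlib
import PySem

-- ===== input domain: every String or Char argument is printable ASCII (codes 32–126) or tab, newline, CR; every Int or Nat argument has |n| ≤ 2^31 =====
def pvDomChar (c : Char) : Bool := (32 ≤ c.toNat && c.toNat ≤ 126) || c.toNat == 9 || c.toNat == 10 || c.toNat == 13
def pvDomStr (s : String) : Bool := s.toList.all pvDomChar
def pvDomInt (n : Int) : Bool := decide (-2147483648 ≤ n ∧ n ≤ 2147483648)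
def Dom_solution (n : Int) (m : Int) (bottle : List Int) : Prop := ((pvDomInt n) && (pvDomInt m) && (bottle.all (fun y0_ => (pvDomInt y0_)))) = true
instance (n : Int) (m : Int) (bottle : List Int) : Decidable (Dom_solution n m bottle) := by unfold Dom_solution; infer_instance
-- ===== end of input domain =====

-- B replaces A's binary search over the value range (with a feasibility scan per probe)
-- by one linear pass taking the minimum of floor(prefix_sum/prefix_len) over all prefixes
-- of the residue groups; objective: faster.

-- ===== PORT A =====
-- inner loop of check over one group: `remind` accumulator, early `return False`
def checkGroup (mid : Int) : List Int → Int → Bool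
  | [], _ => true
  | x :: rest, remind =>
    if x ≥ mid then
      checkGroup mid rest (remind + (x - mid))
    else
      -- now[j] < mid
      let r := remind - (mid - x)
      if r < 0 then false else checkGroup mid rest r

-- check(mid): loop `for i in range(m)` over the m groups with early return False;
-- `group` has exactly m entries whenever the loop body runs, so this is List.all.
def checkA (mid : Int) (group : List (List Int)) : Bool :=
  group.all (fun now => checkGroup mid now 0)

-- the `while l <= r` binary-search loop; mid = (l + r) >> 1 = floor division by 2,
-- written out at each use
def bsLoop (group : List (List Int)) (l r ans : Int) : Int :=
  if h : l ≤ r then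
    if checkA (PySem.Int.floordiv (l + r) 2) group then
      bsLoop group (PySem.Int.floordiv (l + r) 2 + 1) r (max ans (PySem.Int.floordiv (l + r) 2))
    else bsLoop group l (PySem.Int.floordiv (l + r) 2 - 1) ans
  else ans
termination_by (r - l + 1).toNat
decreasing_by
  all_goals
    have hb := PySem.Int.floordiv_two_mid_bounds h
    omega

def solution (n : Int) (m : Int) (bottle : List Int) : Int :=
  -- group = [[] for _ in range(m)]; for i in range(n): group[i % m].append(bottle[i])
  -- bottle[i] and group[i % m] are in range under Pre_, so the total forms are exact here
  let group := (PySem.List.pyRange 0 n 1).foldl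
    (fun gs i =>
      PySem.List.pySetD gs (PySem.Int.mod i m)
        (PySem.List.pyGetD gs (PySem.Int.mod i m) [] ++ [PySem.List.pyGetD bottle i 0]))
    (List.replicate m.toNat [])
  -- l, r = min(bottle), max(bottle): defined since bottle ≠ [] by Pre_
  let l := (PySem.List.min? bottle (fun x => x)).getD 0
  let r := (PySem.List.max? bottle (fun x => x)).getD 0
  bsLoop group l r l

-- ===== PORT B =====
def solution_alt (n : Int) (m : Int) (bottle : List Int) : Int :=
  -- ans = max(bottle); for g in range(m): s = 0; c = 0;
  --   for i in range(g, n, m): s += bottle[i]; c += 1; ans = min(ans, s // c)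
  (PySem.List.pyRange 0 m 1).foldl
    (fun ans g =>
      ((PySem.List.pyRange g n m).foldl
        (fun (st : Int × Int × Int) i =>
          let s := st.1 + PySem.List.pyGetD bottle i 0
          let c := st.2.1 + 1
          (s, c, min st.2.2 (PySem.Int.floordiv s c)))
        (0, 0, ans)).2.2)
    ((PySem.List.max? bottle (fun x => x)).getD 0)

-- ===== PRECONDITION & SPEC =====
-- Pre_ excludes exactly the inputs where A raises: empty bottle (min/max → ValueError),
-- n > len(bottle) (bottle[i] → IndexError), and m ≤ 0 with n > 0 (group[i % m] →
-- ZeroDivisionError / IndexError).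
def Pre_solution (n : Int) (m : Int) (bottle : List Int) : Prop :=
  bottle ≠ [] ∧ n ≤ (bottle.length : Int) ∧ (0 < m ∨ n ≤ 0)
instance (n : Int) (m : Int) (bottle : List Int) : Decidable (Pre_solution n m bottle) := by unfold Pre_solution; infer_instance
def pvWitness_solution : Int × Int × List Int := (5, 2, [3, 1, 4, 1, 5])

def Spec_solution (n : Int) (m : Int) (bottle : List Int) (out : Int) : Prop := out = solution_alt n m bottle
instance (n : Int) (m : Int) (bottle : List Int) (out : Int) : Decidable (Spec_solution n m bottle out) := by unfold Spec_solution; infer_instance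

-- ===== CLAIM (what is proved, stated in full; the proofs are below) =====
def Claim_equal_solution : Prop := ∀ (n : Int) (m : Int) (bottle : List Int), Dom_solution n m bottle → Pre_solution n m bottle → Spec_solution n m bottle (solution n m bottle)

-- ===== LEMMAS AND PROOFS =====

-- the prefix condition a feasible `mid` must satisfy on one group
def Pref (mid : Int) (g : List Int) : Prop :=
  ∀ k : Nat, k < g.length → mid * ((k : Int) + 1) ≤ (g.take (k + 1)).sum

-- B's inner loop, as a fold over the group's VALUES (bridged to the index fold by List.foldl_map)
def innerVals (xs : List Int) (st : Int × Int × Int) : Int × Int × Int :=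
  xs.foldl
    (fun st x =>
      let s := st.1 + x
      let c := st.2.1 + 1
      (s, c, min st.2.2 (PySem.Int.floordiv s c)))
    st

-- the group of residue g, as a filter of range(n)
def filG (n m : Int) (g : Int) : List Int :=
  (PySem.List.pyRange 0 n 1).filter (fun i => PySem.Int.mod i m == g)

lemma checkGroup_iff (mid : Int) (xs : List Int) : ∀ remind : Int, 0 ≤ remind →
    (checkGroup mid xs remind = true ↔
      ∀ k : Nat, k < xs.length → 0 ≤ remind + (xs.take (k + 1)).sum - mid * ((k : Int) + 1)) := by
  induction xs with
  | nil => intro remind h; simp [checkGroup]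
  | cons x rest ih =>
    intro remind h
    by_cases hx : x ≥ mid
    · rw [show checkGroup mid (x :: rest) remind = checkGroup mid rest (remind + (x - mid)) by
        simp [checkGroup, hx]]
      rw [ih _ (by omega)]
      constructor
      · intro hall k hk
        cases k with
        | zero => simp; omega
        | succ k' =>
          have := hall k' (by simpa using hk)
          simp [List.take_succ_cons] at *
          ring_nf at *
          omega
      · intro hall k hk
        have := hall (k + 1) (by simpa using hk)
        simp [List.take_succ_cons] at *
        ring_nf at *
        omega
    · have hx' : ¬ (x ≥ mid) := hx
      by_cases hr : remind - (mid - x) < 0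
      · rw [show checkGroup mid (x :: rest) remind = false by simp [checkGroup, hx', hr]]
        simp only [Bool.false_eq_true, false_iff]
        intro hall
        have h0 := hall 0 (by simp)
        simp at h0
        omega
      · rw [show checkGroup mid (x :: rest) remind = checkGroup mid rest (remind - (mid - x)) by
          simp [checkGroup, hx', hr]]
        rw [ih _ (by omega)]
        constructor
        · intro hall k hk
          cases k with
          | zero => simp; omega
          | succ k' =>
            have := hall k' (by simpa using hk)
            simp [List.take_succ_cons] at *
            ring_nf at *
            omega
        · intro hall k hk
          have := hall (k + 1) (by simpa using hk)
          simp [List.take_succ_cons] at *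
          ring_nf at *
          omega

lemma checkA_iff (mid : Int) (gs : List (List Int)) :
    checkA mid gs = true ↔ ∀ g ∈ gs, Pref mid g := by
  unfold checkA Pref
  rw [List.all_eq_true]
  constructor
  · intro h g hg k hk
    have := (checkGroup_iff mid g 0 le_rfl).mp (by simpa using h g hg) k hk
    omega
  · intro h g hg
    rw [checkGroup_iff mid g 0 le_rfl]
    intro k hk
    have := h g hg k hk
    omega

lemma inner_le_iff (xs : List Int) : ∀ (s c a mid : Int), 0 ≤ c →
    (mid ≤ (innerVals xs (s, c, a)).2.2 ↔
      mid ≤ a ∧ ∀ k : Nat, k < xs.length → mid * (c + (k : Int) + 1) ≤ s + (xs.take (k + 1)).sum) := by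
  induction xs with
  | nil => intro s c a mid hc; simp [innerVals]
  | cons x rest ih =>
    intro s c a mid hc
    have hstep : innerVals (x :: rest) (s, c, a) =
        innerVals rest (s + x, c + 1, min a (PySem.Int.floordiv (s + x) (c + 1))) := by
      simp [innerVals]
    rw [hstep, ih _ _ _ _ (by omega)]
    rw [le_min_iff, PySem.Int.le_floordiv_iff_mul_le (by omega)]
    constructor
    · rintro ⟨⟨ha, hfd⟩, hall⟩
      refine ⟨ha, ?_⟩
      intro k hk
      cases k with
      | zero => simp; omega
      | succ k' =>
        have := hall k' (by simpa using hk)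
        simp [List.take_succ_cons] at *
        ring_nf at *
        omega
    · rintro ⟨ha, hall⟩
      have h0 := hall 0 (by simp)
      simp at h0
      refine ⟨⟨ha, by omega⟩, ?_⟩
      intro k hk
      have := hall (k + 1) (by simpa using hk)
      simp [List.take_succ_cons] at *
      ring_nf at *
      omega

lemma outer_le_iff (gs : List (List Int)) : ∀ (a mid : Int),
    (mid ≤ gs.foldl (fun a g => (innerVals g (0, 0, a)).2.2) a ↔
      mid ≤ a ∧ ∀ g ∈ gs, Pref mid g) := by
  induction gs with
  | nil => intro a mid; simp
  | cons g rest ih =>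
    intro a mid
    rw [List.foldl_cons, ih, inner_le_iff _ _ _ _ _ (by omega)]
    unfold Pref
    constructor
    · rintro ⟨⟨ha, hg⟩, hall⟩
      refine ⟨ha, ?_⟩
      intro g' hg'
      rcases List.mem_cons.mp hg' with h | h
      · subst h; intro k hk; have := hg k hk; ring_nf at *; omega
      · exact hall g' h
    · rintro ⟨ha, hall⟩
      refine ⟨⟨ha, ?_⟩, fun g' h => hall g' (List.mem_cons.mpr (Or.inr h))⟩
      intro k hk; have := hall g (List.mem_cons.mpr (Or.inl rfl)) k hk; ring_nf at *; omega

lemma bsLoop_spec (gs : List (List Int)) (b : Int) : ∀ (l r ans : Int),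
    (∀ mid, l ≤ mid → mid ≤ r → (checkA mid gs = true ↔ mid ≤ b)) →
    bsLoop gs l r ans = if l ≤ min b r then max ans (min b r) else ans := by
  intro l r ans
  induction l, r, ans using bsLoop.induct gs with
  | case1 l r ans h hc ih =>
    intro hyp
    have hmb := PySem.Int.floordiv_two_mid_bounds h
    have hmid : PySem.Int.floordiv (l + r) 2 ≤ b :=
      (hyp _ hmb.1 hmb.2).mp hc
    rw [bsLoop, dif_pos h, if_pos hc, ih (fun x h1 h2 => hyp x (by omega) h2)]
    split_ifs with h1 h2 <;> omega
  | case2 l r ans h hc ih =>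
    intro hyp
    have hmb := PySem.Int.floordiv_two_mid_bounds h
    have hmid : ¬ (PySem.Int.floordiv (l + r) 2 ≤ b) := fun hx => hc ((hyp _ hmb.1 hmb.2).mpr hx)
    rw [bsLoop, dif_pos h, if_neg hc, ih (fun x h1 h2 => hyp x h1 (by omega))]
    split_ifs with h1 h2 <;> omega
  | case3 l r ans h =>
    intro hyp
    rw [bsLoop, dif_neg h, if_neg (by omega)]

lemma pyRange_step_pairwise (g n m : Int) (hm : 0 < m) :
    (PySem.List.pyRange g n m).Pairwise (· < ·) := by
  rw [PySem.List.pyRange_of_pos _ _ hm]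
  refine List.Pairwise.map _ (fun a b hab => ?_) (List.pairwise_lt_range)
  nlinarith

lemma mem_filG (n m g i : Int) (hm : 0 < m) (hg0 : 0 ≤ g) (hgm : g < m) :
    i ∈ filG n m g ↔ g ≤ i ∧ i < n ∧ m ∣ i - g := by
  unfold filG
  rw [List.mem_filter]
  rw [PySem.List.mem_pyRange_one]
  rw [PySem.Int.mod_eq_emod_of_pos hm]
  constructor
  · rintro ⟨⟨h0, hn⟩, he⟩
    have he' : i % m = g := by simpa using he
    have hd : m ∣ i - g := by
      have hz : (i - g) % m = 0 := by
        rw [Int.sub_emod, he', Int.emod_eq_of_lt hg0 hgm]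
        simp
      exact Int.dvd_of_emod_eq_zero hz
    refine ⟨?_, hn, hd⟩
    rcases hd with ⟨k, hk⟩
    by_cases hk0 : 0 ≤ k
    · nlinarith
    · have : k ≤ -1 := by omega
      nlinarith
  · rintro ⟨hgi, hn, hd⟩
    have h0 : 0 ≤ i := by omega
    refine ⟨⟨h0, hn⟩, ?_⟩
    have hmod : i % m = g := by
      rcases hd with ⟨k, hk⟩
      have h1 : i % m = (g + m * k) % m := by rw [show g + m * k = i by omega]
      rw [h1, Int.add_mul_emod_self_left, Int.emod_eq_of_lt hg0 hgm]
    simpa using hmod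

lemma filG_eq (n m g : Int) (hm : 0 < m) (hg0 : 0 ≤ g) (hgm : g < m) :
    filG n m g = PySem.List.pyRange g n m := by
  have hp1 : (filG n m g).Pairwise (· < ·) :=
    List.Pairwise.filter _ (PySem.List.pairwise_lt_pyRange_one 0 n)
  have hp2 := pyRange_step_pairwise g n m hm
  have hperm : List.Perm (filG n m g) (PySem.List.pyRange g n m) := by
    rw [List.perm_ext_iff_of_nodup (hp1.imp ne_of_lt) (hp2.imp ne_of_lt)]
    intro x
    rw [mem_filG n m g x hm hg0 hgm, PySem.List.mem_pyRange_iff_of_pos hm]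
  exact hperm.eq_of_pairwise (fun a b _ _ h1 h2 => absurd h2 (lt_asymm h1)) hp1 hp2

lemma build_nat (m : Int) (bottle : List Int) (hm : 0 < m) : ∀ N : Nat,
    (PySem.List.pyRange 0 (N : Int) 1).foldl
      (fun gs i =>
        PySem.List.pySetD gs (PySem.Int.mod i m)
          (PySem.List.pyGetD gs (PySem.Int.mod i m) [] ++ [PySem.List.pyGetD bottle i 0]))
      (List.replicate m.toNat []) =
    (PySem.List.pyRange 0 m 1).map
      (fun g => (filG (N : Int) m g).map (fun i => PySem.List.pyGetD bottle i 0)) := by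
  intro N
  induction N with
  | zero =>
    rw [show ((0 : Nat) : Int) = 0 by norm_num]
    rw [PySem.List.pyRange_one_eq_nil (by omega)]
    simp only [List.foldl_nil]
    unfold filG
    rw [PySem.List.pyRange_one_eq_nil (by omega)]
    simp only [List.filter_nil, List.map_nil]
    rw [List.map_const', PySem.List.length_pyRange_one]
    norm_num
  | succ N ih =>
    have hc : ((N + 1 : Nat) : Int) = (N : Int) + 1 := by push_cast; ring
    rw [hc, PySem.List.pyRange_one_succ_right (by positivity), List.foldl_append,
      List.foldl_cons, List.foldl_nil, ih]
    have hj0 : 0 ≤ PySem.Int.mod (N : Int) m := PySem.Int.mod_nonneg _ hm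
    have hjm : PySem.Int.mod (N : Int) m < m := PySem.Int.mod_lt _ hm
    set j := PySem.Int.mod (N : Int) m with hjdef
    have hlenR : (PySem.List.pyRange 0 m 1).length = m.toNat := by
      rw [PySem.List.length_pyRange_one]; norm_num
    apply List.ext_getElem
    · simp [PySem.List.pySetD_of_nonneg _ _ hj0]
    · intro k hk1 hk2
      have hkm : k < m.toNat := by
        simpa [PySem.List.pySetD_of_nonneg _ _ hj0, hlenR] using hk1
      simp only [PySem.List.pySetD_of_nonneg _ _ hj0] at hk1 ⊢
      simp only [List.getElem_set, List.getElem_map, PySem.List.getElem_pyRange_one, zero_add]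
      have hfil : filG ((N : Int) + 1) m ((k : Int)) =
          filG (N : Int) m ((k : Int)) ++
            (if j = (k : Int) then [(N : Int)] else []) := by
        rw [hjdef]
        unfold filG
        rw [PySem.List.pyRange_one_succ_right (by positivity), List.filter_append]
        by_cases hc2 : PySem.Int.mod (N : Int) m = ((k : Int)) <;> simp [hc2]
      rw [hfil, List.map_append]
      by_cases hjk : j.toNat = k
      · rw [if_pos hjk]
        have hget : PySem.List.pyGetD
            ((PySem.List.pyRange 0 m 1).map
              (fun g => (filG (N : Int) m g).map (fun i => PySem.List.pyGetD bottle i 0))) j [] =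
            (filG (N : Int) m ((k : Int))).map (fun i => PySem.List.pyGetD bottle i 0) := by
          rw [PySem.List.pyGetD_eq_getElem _ _ hj0 (by rw [List.length_map, hlenR]; omega)]
          simp only [List.getElem_map, PySem.List.getElem_pyRange_one, zero_add]
          congr 2
          omega
        rw [hget, if_pos (by omega)]
        simp
      · rw [if_neg hjk, if_neg (by omega)]
        simp

lemma groups_eq (n m : Int) (bottle : List Int) (hm : 0 < m) :
    (PySem.List.pyRange 0 n 1).foldl
      (fun gs i =>
        PySem.List.pySetD gs (PySem.Int.mod i m)
          (PySem.List.pyGetD gs (PySem.Int.mod i m) [] ++ [PySem.List.pyGetD bottle i 0]))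
      (List.replicate m.toNat []) =
    (PySem.List.pyRange 0 m 1).map
      (fun g => (filG n m g).map (fun i => PySem.List.pyGetD bottle i 0)) := by
  by_cases h0 : 0 ≤ n
  · have := build_nat m bottle hm n.toNat
    rwa [Int.toNat_of_nonneg h0] at this
  · rw [PySem.List.pyRange_one_eq_nil (by omega)]
    simp only [List.foldl_nil]
    have hfg : ∀ g ∈ PySem.List.pyRange 0 m 1,
        (filG n m g).map (fun i => PySem.List.pyGetD bottle i 0) = ([] : List Int) := by
      intro g _
      unfold filG
      rw [PySem.List.pyRange_one_eq_nil (by omega)]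
      simp
    rw [List.map_congr_left hfg, List.map_const', PySem.List.length_pyRange_one]
    norm_num

lemma sum_lb (xs : List Int) (c : Int) (h : ∀ x ∈ xs, c ≤ x) : c * xs.length ≤ xs.sum := by
  induction xs with
  | nil => simp
  | cons x t ih =>
    have h1 : c ≤ x := h x (List.mem_cons_self)
    have h2 := ih (fun y hy => h y (List.mem_cons_of_mem _ hy))
    simp only [List.length_cons, List.sum_cons]
    push_cast
    nlinarith

-- ===== VERDICT (by name: the statement is the Claim_ definition above) =====
theorem solution_spec : Claim_equal_solution := by
  intro n m bottle hdom hpre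
  obtain ⟨hne, hlen, hm0⟩ := hpre
  unfold Spec_solution
  obtain ⟨mn, hmin⟩ : ∃ v, PySem.List.min? bottle (fun x => x) = some v := by
    cases hb : PySem.List.min? bottle (fun x => x) with
    | none => exact absurd ((PySem.List.min?_eq_none_iff _ _).mp hb) hne
    | some v => exact ⟨v, rfl⟩
  obtain ⟨mx, hmax⟩ : ∃ v, PySem.List.max? bottle (fun x => x) = some v := by
    cases hb : PySem.List.max? bottle (fun x => x) with
    | none => exact absurd ((PySem.List.max?_eq_none_iff _ _).mp hb) hne
    | some v => exact ⟨v, rfl⟩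
  have hmnle : ∀ y ∈ bottle, mn ≤ y := fun y hy => PySem.List.min?_isMin hmin y hy
  have hmxge : ∀ y ∈ bottle, y ≤ mx := fun y hy => PySem.List.max?_isMax hmax y hy
  have hmnmx : mn ≤ mx := hmxge _ (PySem.List.min?_mem hmin)
  by_cases hm : 0 < m
  · -- main case: m > 0
    set f : Int → Int := fun i => PySem.List.pyGetD bottle i 0 with hf
    set gs : List (List Int) :=
      (PySem.List.pyRange 0 m 1).map (fun g => (filG n m g).map f) with hgs
    set b : Int := gs.foldl (fun a g => (innerVals g (0, 0, a)).2.2) mx with hb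
    have hA : solution n m bottle = bsLoop gs mn mx mn := by
      unfold solution
      rw [groups_eq n m bottle hm, hmin, hmax]
      rfl
    have hB : solution_alt n m bottle = b := by
      unfold solution_alt
      rw [hmax]
      rw [PySem.List.foldl_congr_mem _ _
        (fun ans g => (innerVals ((filG n m g).map f) (0, 0, ans)).2.2) _
        (by
          intro acc g hg
          rw [PySem.List.mem_pyRange_one] at hg
          rw [← filG_eq n m g hm (by omega) (by omega)]
          simp only [innerVals, List.foldl_map]
          rfl)]
      rw [hb, hgs, List.foldl_map]
      rfl
    have hyp : ∀ mid, mn ≤ mid → mid ≤ mx → (checkA mid gs = true ↔ mid ≤ b) := by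
      intro mid h1 h2
      rw [checkA_iff, hb, outer_le_iff]
      exact ⟨fun h => ⟨h2, h⟩, fun h => h.2⟩
    have hble : b ≤ mx := ((outer_le_iff gs mx b).mp hb.le).1
    have hmnb : mn ≤ b := by
      rw [hb, outer_le_iff]
      refine ⟨hmnmx, ?_⟩
      intro g' hg'
      rw [hgs, List.mem_map] at hg'
      obtain ⟨g, hgR, rfl⟩ := hg'
      intro k hk
      have hall : ∀ x ∈ ((filG n m g).map f).take (k + 1), mn ≤ x := by
        intro x hx
        have hx2 := List.mem_of_mem_take hx
        rw [List.mem_map] at hx2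
        obtain ⟨i, hi, rfl⟩ := hx2
        have hi2 : i ∈ PySem.List.pyRange 0 n 1 := List.mem_of_mem_filter hi
        rw [PySem.List.mem_pyRange_one] at hi2
        have hmem : f i ∈ bottle := by
          rw [hf]
          exact PySem.List.pyGetD_mem bottle 0 (by
            unfold PySem.Raise.InRange
            omega)
        exact hmnle _ hmem
      have hlen2 : ((((filG n m g).map f).take (k + 1)).length : Int) = (k : Int) + 1 := by
        rw [List.length_take]
        have := hk
        simp only [List.length_map] at this ⊢
        omega
      have hsum := sum_lb _ mn hall
      rw [hlen2] at hsum
      calc mn * ((k : Int) + 1) ≤ ((((filG n m g).map f).take (k + 1))).sum := hsum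
        _ = ((((filG n m g).map f)).take (k + 1)).sum := rfl
    rw [hA, hB, bsLoop_spec gs b mn mx mn hyp, if_pos (by omega)]
    omega
  · -- degenerate case: m ≤ 0 (then n ≤ 0 by Pre_)
    have hn0 : n ≤ 0 := by
      rcases hm0 with h | h
      · omega
      · exact h
    have hA : solution n m bottle = bsLoop [] mn mx mn := by
      unfold solution
      rw [PySem.List.pyRange_one_eq_nil hn0, hmin, hmax]
      simp only [List.foldl_nil]
      rw [show m.toNat = 0 by omega]
      rfl
    have hB : solution_alt n m bottle = mx := by
      unfold solution_alt
      rw [PySem.List.pyRange_one_eq_nil (by omega : m ≤ 0), hmax]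
      rfl
    have hyp : ∀ mid, mn ≤ mid → mid ≤ mx → (checkA mid ([] : List (List Int)) = true ↔ mid ≤ mx) := by
      intro mid h1 h2
      simp [checkA, h2]
    rw [hA, hB, bsLoop_spec [] mx mn mx mn hyp, if_pos (by omega)]
    omega
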